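-- pv_equiv track=rewrite | github.com/jeondele/pyhon-insta | w2v-insta.py | getFullString
-- ===== SOURCE A (Python) =====
-- def getFullString(list):
--     temp_nouns = []
--     str_temp = ''
--     for tags in list:
--         tags = tags.replace('\n', '')
--         tags = tags.split(' ')
--         for tag in tags:
--             if '#' in tag:
--                 temp_nouns.append(tag.split('#'))
--     for v in temp_nouns:
--         str_temp += v[1]
--     return str_temp
-- ===== SOURCE B (Python) =====
-- def getFullString(list):
--     # single char-level scan: no replace/split, no intermediate word lists;
--     # emit a char iff exactly one '#' has been seen in the current word
--     out = []
--     for s in list: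
--         hashes = 0
--         for c in s:
--             if c == '\n':
--                 continue
--             elif c == ' ':
--                 hashes = 0
--             elif c == '#':
--                 hashes += 1
--             elif hashes == 1:
--                 out.append(c)
--     return ''.join(out)
-- ===== Notes on version B (the rewrite author's own statement) =====
-- stated objective: alternative
-- what changed: Replaced A's three-stage pipeline (replace '\n', split on spaces, collect split('#') lists, then a second summing pass) by a single character-level state machine that scans each string once, counting '#'s in the current word and emitting a character exactly when one '#' has been seen; no intermediate word or split lists are built.
import Mathlib
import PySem

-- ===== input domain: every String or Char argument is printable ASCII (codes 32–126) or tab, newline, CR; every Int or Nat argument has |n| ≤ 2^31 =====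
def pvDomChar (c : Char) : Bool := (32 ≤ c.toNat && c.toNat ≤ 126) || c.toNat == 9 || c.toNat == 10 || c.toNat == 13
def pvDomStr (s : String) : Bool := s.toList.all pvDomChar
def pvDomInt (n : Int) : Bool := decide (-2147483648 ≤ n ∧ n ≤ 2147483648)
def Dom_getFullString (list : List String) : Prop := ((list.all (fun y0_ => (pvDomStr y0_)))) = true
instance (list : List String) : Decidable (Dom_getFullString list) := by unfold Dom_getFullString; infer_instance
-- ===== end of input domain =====

-- B replaces A's replace/split/split machinery by one character-level state machine; same return value, no speed claim.

-- ===== PORT A =====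
def getFullString (list : List String) : String :=
  -- temp_nouns accumulated over both loops; tag.split('#') always succeeds (sep ≠ "")
  let temp_nouns : List (List String) :=
    list.foldl (fun acc tags =>
      let tags1 := PySem.Str.replace tags "\n" ""
      let words := (PySem.Str.split? tags1 " ").getD []
      words.foldl (fun acc tag =>
        if PySem.Str.isIn "#" tag then acc ++ [(PySem.Str.split? tag "#").getD []] else acc) acc) []
  -- str_temp += v[1]; index 1 is in range since '#' was in the word (pyGetD with default "")
  temp_nouns.foldl (fun s v => s ++ PySem.List.pyGetD v 1 "") ""

-- ===== PORT B =====
def getFullString_alt (list : List String) : String :=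
  -- out is the shared char list; the Nat component counts '#'s seen in the current word
  String.ofList (list.foldl (fun out s =>
    (s.toList.foldl (fun (st : Nat × List Char) c =>
      if c = '\n' then st
      else if c = ' ' then (0, st.2)
      else if c = '#' then (st.1 + 1, st.2)
      else if st.1 = 1 then (st.1, st.2 ++ [c])
      else st) (0, out)).2) [])

-- ===== PRECONDITION & SPEC =====
def Spec_getFullString (list : List String) (out : String) : Prop := out = getFullString_alt list
instance (list : List String) (out : String) : Decidable (Spec_getFullString list out) := by unfold Spec_getFullString; infer_instance

-- ===== CLAIM (what is proved, stated in full; the proofs are below) =====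
def Claim_equal_getFullString : Prop := ∀ (list : List String), Dom_getFullString list → Spec_getFullString list (getFullString list)

-- ===== LEMMAS AND PROOFS =====

-- what B's machine emits from the chars l when h '#'s have been seen in the current word
def pvTot : Nat → List Char → List Char
  | _, [] => []
  | h, c :: t =>
    if c = '\n' then pvTot h t
    else if c = ' ' then pvTot 0 t
    else if c = '#' then pvTot (h + 1) t
    else if h = 1 then c :: pvTot h t
    else pvTot h t

-- the same machine restricted to a single word (no space resets)
def pvWC : Nat → List Char → List Char
  | _, [] => []
  | h, c :: t =>
    if c = '#' then pvWC (h + 1) t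
    else if h = 1 then c :: pvWC h t
    else pvWC h t

-- B's inner fold is pvTot
theorem pv_fold_inner (l : List Char) : ∀ (h : Nat) (out : List Char),
    (l.foldl (fun (st : Nat × List Char) c =>
      if c = '\n' then st
      else if c = ' ' then (0, st.2)
      else if c = '#' then (st.1 + 1, st.2)
      else if st.1 = 1 then (st.1, st.2 ++ [c])
      else st) (h, out)).2 = out ++ pvTot h l := by
  induction l with
  | nil => intro h out; simp [pvTot]
  | cons c t ih =>
    intro h out
    simp only [List.foldl_cons, pvTot]
    split_ifs with h1 h2 h3 h4 <;> simp [ih]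

-- B's outer fold flat-maps pvTot over the strings
theorem pv_fold_outer (list : List String) : ∀ (out : List Char),
    list.foldl (fun out s =>
      (s.toList.foldl (fun (st : Nat × List Char) c =>
        if c = '\n' then st
        else if c = ' ' then (0, st.2)
        else if c = '#' then (st.1 + 1, st.2)
        else if st.1 = 1 then (st.1, st.2 ++ [c])
        else st) (0, out)).2) out
    = out ++ list.flatMap (fun s => pvTot 0 s.toList) := by
  intro out
  simp only [pv_fold_inner]
  rw [PySem.List.foldl_append_eq_flatMap]

-- replace '\n' by '' is filtering out '\n'
theorem pv_replace_go (l : List Char) : ∀ (fuel : Nat) (acc : List Char), l.length ≤ fuel →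
    PySem.Chars.replace.go ['\n'] [] fuel l acc = acc.reverse ++ l.filter (fun c => c != '\n') := by
  induction l with
  | nil => intro fuel acc _; cases fuel <;> simp [PySem.Chars.replace.go]
  | cons c t ih =>
    intro fuel acc hf
    cases fuel with
    | zero => simp at hf
    | succ f =>
      simp only [PySem.Chars.replace.go]
      by_cases h : c = '\n'
      · subst h
        simp [List.isPrefixOf, ih f acc (by simpa using hf)]
      · have hpre : List.isPrefixOf ['\n'] (c :: t) = false := by
          simp [List.isPrefixOf]; exact fun hc => absurd hc.symm h
        rw [hpre]
        simp only [ih f (c :: acc) (by simpa using hf)]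
        simp [h]

theorem pv_replace_newline (s : String) :
    (PySem.Str.replace s "\n" "").toList = s.toList.filter (fun c => c != '\n') := by
  rw [PySem.Str.toList_replace]
  have h1 : ("\n" : String).toList = ['\n'] := by decide
  have h2 : ("" : String).toList = [] := by decide
  rw [h1, h2]
  simp only [PySem.Chars.replace, List.isEmpty_cons, Bool.false_eq_true, if_false]
  simpa using pv_replace_go s.toList s.toList.length [] le_rfl

-- PySem's splitOn with a one-char separator is List.splitOn
theorem pv_split_go (sc : Char) (l : List Char) : ∀ (fuel : Nat) (cur : List Char) (acc : List (List Char)), l.length ≤ fuel →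
    PySem.Chars.splitOn.go [sc] fuel l cur acc
      = acc.reverse ++ (l.splitOn sc).modifyHead (cur.reverse ++ ·) := by
  induction l with
  | nil =>
    intro fuel cur acc _
    cases fuel <;> simp [PySem.Chars.splitOn.go, List.splitOn, List.splitOnP_nil]
  | cons c t ih =>
    intro fuel cur acc hf
    cases fuel with
    | zero => simp at hf
    | succ f =>
      simp only [PySem.Chars.splitOn.go]
      by_cases h : c = sc
      · subst h
        have hpre : List.isPrefixOf [c] (c :: t) = true := by simp [List.isPrefixOf]
        rw [hpre]
        simp only [List.length_singleton, List.drop_one, List.tail_cons]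
        rw [ih f [] (cur.reverse :: acc) (by simpa using hf)]
        simp [List.splitOn, List.splitOnP_cons]
        cases hsp : List.splitOnP (fun x => x == c) t with
        | nil => exact absurd hsp (List.splitOnP_ne_nil _ _)
        | cons w ws => simp
      · have hpre : List.isPrefixOf [sc] (c :: t) = false := by
          simp [List.isPrefixOf]; exact fun hc => absurd hc.symm h
        rw [hpre]
        rw [ih f (c :: cur) acc (by simpa using hf)]
        simp [List.splitOn, List.splitOnP_cons, h]
        cases hsp : List.splitOnP (fun x => x == sc) t with
        | nil => exact absurd hsp (List.splitOnP_ne_nil _ _)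
        | cons w ws => simp

theorem pv_splitOn_single (sc : Char) (l : List Char) :
    PySem.Chars.splitOn l [sc] = l.splitOn sc := by
  simp only [PySem.Chars.splitOn]
  rw [pv_split_go sc l (l.length + 1) [] [] (by omega)]
  simp
  cases hsp : l.splitOn sc with
  | nil => exact absurd hsp (by simp [List.splitOn]; exact List.splitOnP_ne_nil _ _)
  | cons w ws => simp

-- pvTot ignores '\n'
theorem pv_tot_filter (l : List Char) : ∀ (h : Nat),
    pvTot h l = pvTot h (l.filter (fun c => c != '\n')) := by
  induction l with
  | nil => intro h; simp
  | cons c t ih =>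
    intro h
    by_cases hc : c = '\n'
    · subst hc; simp [pvTot, ih]
    · have hb : (c != '\n') = true := by simpa using hc
      rw [List.filter_cons, if_pos hb]
      simp only [pvTot, if_neg hc]
      split_ifs <;> simp [ih]

-- per-word machine facts
theorem pv_wc_ge2 (w : List Char) : ∀ (h : Nat), 2 ≤ h → pvWC h w = [] := by
  induction w with
  | nil => intro h _; simp [pvWC]
  | cons c t ih =>
    intro h hh
    simp only [pvWC]
    split_ifs with h1 h2
    · exact ih (h + 1) (by omega)
    · omega
    · exact ih h hh

theorem pv_wc_one (w : List Char) : pvWC 1 w = w.takeWhile (fun c => c != '#') := by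
  induction w with
  | nil => simp [pvWC]
  | cons c t ih =>
    by_cases hc : c = '#'
    · subst hc; simp [pvWC, List.takeWhile_cons, pv_wc_ge2 t 2 le_rfl]
    · have : (c != '#') = true := by simpa using hc
      simp [pvWC, hc, List.takeWhile_cons, this, ih]

theorem pv_wc_zero_nohash (w : List Char) (h : '#' ∉ w) : pvWC 0 w = [] := by
  induction w with
  | nil => simp [pvWC]
  | cons c t ih =>
    have hc : c ≠ '#' := fun e => h (e ▸ List.mem_cons_self)
    simp only [pvWC, if_neg hc]
    exact ih (fun m => h (List.mem_cons_of_mem _ m))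

theorem pv_wc_zero_append (a b : List Char) (h : '#' ∉ a) :
    pvWC 0 (a ++ '#' :: b) = pvWC 1 b := by
  induction a with
  | nil => simp [pvWC]
  | cons c t ih =>
    have hc : c ≠ '#' := fun e => h (e ▸ List.mem_cons_self)
    simp only [List.cons_append, pvWC, if_neg hc]
    exact ih (fun m => h (List.mem_cons_of_mem _ m))

-- the first piece of splitOnP is the takeWhile prefix
theorem pv_splitOnP_head (p : Char → Bool) (b : List Char) :
    List.splitOnP p b = (b.takeWhile (fun a => !p a)) :: (List.splitOnP p b).tail := by
  induction b with
  | nil => simp [List.splitOnP_nil]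
  | cons c t ih =>
    by_cases hc : p c
    · simp [List.splitOnP_cons, hc, List.takeWhile_cons]
    · have hb : (!p c) = true := by simpa using hc
      rw [List.splitOnP_cons, if_neg (by simpa using hc)]
      rw [ih]
      simp [List.takeWhile_cons, hb]

-- head of a nonempty dropWhile fails the predicate
theorem pv_dropWhile_head (p : Char → Bool) (l : List Char) (d : Char) (r : List Char)
    (h : l.dropWhile p = d :: r) : p d = false := by
  induction l with
  | nil => simp at h
  | cons c t ih =>
    rw [List.dropWhile_cons] at h
    by_cases hc : p c
    · exact ih (by simpa [hc] using h)
    · simp [hc] at h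
      obtain ⟨rfl, -⟩ := h
      simpa using hc

-- the A-side word value equals the machine's word value
theorem pv_word (w : List Char) :
    (if PySem.Chars.isIn ['#'] w = true then PySem.List.pyGetD (w.splitOn '#') 1 [] else [])
      = pvWC 0 w := by
  by_cases hmem : '#' ∈ w
  · have hin : PySem.Chars.isIn ['#'] w = true := by
      rw [PySem.Chars.isIn_iff_infix]
      obtain ⟨s, t, rfl⟩ := List.append_of_mem hmem
      exact ⟨s, t, by simp⟩
    rw [if_pos hin]
    -- decompose w at its first '#'
    set a := w.takeWhile (fun c => c != '#') with ha
    have hdw : w.dropWhile (fun c => c != '#') ≠ [] := by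
      intro hnil
      rw [List.dropWhile_eq_nil_iff] at hnil
      simpa using hnil '#' hmem
    obtain ⟨d, r, hdr⟩ : ∃ d r, w.dropWhile (fun c => c != '#') = d :: r := by
      cases hcase : w.dropWhile (fun c => c != '#') with
      | nil => exact absurd hcase hdw
      | cons d r => exact ⟨d, r, rfl⟩
    have hd : d = '#' := by
      have := pv_dropWhile_head (fun c => c != '#') w d r hdr
      simpa using this
    subst hd
    have hw : w = a ++ '#' :: r := by
      rw [ha, ← hdr, List.takeWhile_append_dropWhile]
    have hana : '#' ∉ a := by
      intro hm
      have := List.mem_takeWhile_imp (ha ▸ hm)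
      simp at this
    rw [hw, pv_wc_zero_append a r hana, pv_wc_one]
    have hsplit : (a ++ '#' :: r).splitOn '#' = a :: r.splitOn '#' := by
      simp only [List.splitOn]
      exact List.splitOnP_first _ a (by intro x hx hbeq; exact hana ((beq_iff_eq.mp hbeq) ▸ hx)) '#' (by simp) r
    rw [hsplit]
    rw [show (List.splitOn '#' r) = (r.takeWhile (fun c => c != '#')) :: (List.splitOnP (fun x => x == '#') r).tail from pv_splitOnP_head _ r]
    simp [PySem.List.pyGetD, PySem.List.pyIdx?]
  · have hin : PySem.Chars.isIn ['#'] w = false := by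
      rw [PySem.Chars.isIn_eq_false_iff]
      intro ⟨s, t, he⟩
      exact hmem (by rw [← he]; simp)
    rw [hin]
    simp [pv_wc_zero_nohash w hmem]

-- pvTot over a '\n'-free list is the word machine over its space-split
theorem pv_tot_splitOn (l : List Char) (hl : ∀ c ∈ l, c ≠ '\n') : ∀ (h : Nat),
    pvTot h l
      = pvWC h ((l.splitOn ' ').headD []) ++ (((l.splitOn ' ').tail).map (pvWC 0)).flatten := by
  induction l with
  | nil => intro h; simp [pvTot, List.splitOn, List.splitOnP_nil, pvWC]
  | cons c t ih =>
    intro h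
    have hc : c ≠ '\n' := hl c List.mem_cons_self
    have ht : ∀ c ∈ t, c ≠ '\n' := fun x hx => hl x (List.mem_cons_of_mem _ hx)
    simp only [pvTot, if_neg hc]
    by_cases hsp : c = ' '
    · subst hsp
      rw [if_pos rfl]
      simp only [List.splitOn, List.splitOnP_cons, if_pos (by simp : ((' ' : Char) == ' ') = true)]
      rw [ih ht 0]
      cases hc2 : List.splitOnP (fun x => x == ' ') t with
      | nil => exact absurd hc2 (List.splitOnP_ne_nil _ _)
      | cons w ws => simp [List.splitOn, hc2, pvWC]
    · rw [if_neg hsp]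
      simp only [List.splitOn, List.splitOnP_cons, if_neg (by simpa using hsp)]
      cases hc2 : List.splitOnP (fun x => x == ' ') t with
      | nil => exact absurd hc2 (List.splitOnP_ne_nil _ _)
      | cons w ws =>
        have iht := ih ht
        simp only [List.splitOn, hc2] at iht
        by_cases hh : c = '#'
        · subst hh
          rw [if_pos rfl]
          simp [iht (h + 1), pvWC]
        · rw [if_neg hh]
          by_cases h1 : h = 1
          · subst h1
            simp [iht 1, pvWC, hh, hsp]
          · simp [iht h, pvWC, hh, h1, hsp]

-- flatten over a filtered map is flatten over an if-map
theorem pv_flatten_filter {α : Type} (p : α → Bool) (f : α → List Char) (ws : List α) :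
    (((ws.filter p).map f)).flatten = (ws.map (fun w => if p w = true then f w else [])).flatten := by
  induction ws with
  | nil => rfl
  | cons w ws ih =>
    by_cases h : p w <;> simp [List.filter_cons, h, ih]

-- A's trailing string-append fold, on the toList side
theorem pv_foldl_strapp (g : List String → String) (vs : List (List String)) : ∀ (s : String),
    ((vs.foldl (fun s v => s ++ g v) s)).toList = s.toList ++ (vs.map (fun v => (g v).toList)).flatten := by
  induction vs with
  | nil => intro s; simp
  | cons v vs ih =>
    intro s
    simp only [List.foldl_cons, ih, String.toList_append, List.map_cons, List.flatten_cons, List.append_assoc]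

-- flatten commutes with flatMap
theorem pv_flatten_flatMap {α : Type} (f : α → List (List Char)) (l : List α) :
    (l.flatMap f).flatten = l.flatMap (fun x => (f x).flatten) := by
  induction l with
  | nil => rfl
  | cons x l ih => simp [List.flatMap_cons, List.flatten_append, ih]

-- per string: A's pieces = B's machine output
theorem pv_string_contrib (s : String) :
    ((((PySem.Str.split? (PySem.Str.replace s "\n" "") " ").getD []).filter
        (fun w => PySem.Str.isIn "#" w)).map
      (fun w => (PySem.List.pyGetD ((PySem.Str.split? w "#").getD []) 1 "").toList)).flatten
    = pvTot 0 s.toList := by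
  have h1 : (PySem.Str.replace s "\n" "").toList = s.toList.filter (fun c => c != '\n') :=
    pv_replace_newline s
  have hsep : (" " : String).toList = [' '] := by decide
  have hE : PySem.Chars.split? (PySem.Str.replace s "\n" "").toList [' ']
      = some ((s.toList.filter (fun c => c != '\n')).splitOn ' ') := by
    simp [PySem.Chars.split?, pv_splitOn_single, h1]
  obtain ⟨ws, hws, hmap⟩ : ∃ ws, PySem.Str.split? (PySem.Str.replace s "\n" "") " " = some ws ∧
      ws.map String.toList = (s.toList.filter (fun c => c != '\n')).splitOn ' ' := by
    have hb := PySem.Str.split?_map (PySem.Str.replace s "\n" "") " "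
    rw [hsep, hE] at hb
    cases hcase : PySem.Str.split? (PySem.Str.replace s "\n" "") " " with
    | none => rw [hcase] at hb; simp at hb
    | some ws => rw [hcase] at hb; exact ⟨ws, rfl, by simpa using hb⟩
  rw [hws]
  -- per word: the piece A extracts, moved to the char level
  have hpiece : ∀ w : String,
      (PySem.List.pyGetD ((PySem.Str.split? w "#").getD []) 1 "").toList
        = PySem.List.pyGetD (w.toList.splitOn '#') 1 [] := by
    intro w
    have hsep2 : ("#" : String).toList = ['#'] := by decide
    have hE2 : PySem.Chars.split? w.toList ['#'] = some (w.toList.splitOn '#') := by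
      simp [PySem.Chars.split?, pv_splitOn_single]
    have hb := PySem.Str.split?_map w "#"
    rw [hsep2, hE2] at hb
    cases hcase : PySem.Str.split? w "#" with
    | none => rw [hcase] at hb; simp at hb
    | some vs =>
      rw [hcase] at hb
      simp only [Option.map_some, Option.some_inj] at hb
      have : (("" : String)).toList = [] := by decide
      rw [Option.getD_some, ← this, ← PySem.List.pyGetD_map String.toList vs 1 "", hb, this]
  have hfil : ∀ w : String, PySem.Str.isIn "#" w = PySem.Chars.isIn ['#'] w.toList := by
    intro w
    rw [PySem.Str.isIn_eq, show ("#" : String).toList = ['#'] from by decide]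
  -- move filter and map to the char-list side
  calc ((ws.filter (fun w => PySem.Str.isIn "#" w)).map
          (fun w => (PySem.List.pyGetD ((PySem.Str.split? w "#").getD []) 1 "").toList)).flatten
      = (((ws.map String.toList).filter (fun w => PySem.Chars.isIn ['#'] w)).map
          (fun w => PySem.List.pyGetD (w.splitOn '#') 1 [])).flatten := by
        rw [List.filter_map, List.map_map]
        congr 1
        apply List.map_congr_left
        intro w hw
        exact hpiece w
    _ = (((s.toList.filter (fun c => c != '\n')).splitOn ' ').map (pvWC 0)).flatten := by
        rw [hmap, pv_flatten_filter]
        congr 1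
        apply List.map_congr_left
        intro w _
        exact pv_word w
    _ = pvTot 0 s.toList := by
        rw [pv_tot_filter s.toList 0]
        rw [pv_tot_splitOn _ (by intro c hc; have := List.of_mem_filter hc; simpa using this) 0]
        cases hsp : (s.toList.filter (fun c => c != '\n')).splitOn ' ' with
        | nil => exact absurd hsp (by simp [List.splitOn]; exact List.splitOnP_ne_nil _ _)
        | cons w wtl => simp

-- ===== VERDICT (by name: the statement is the Claim_ definition above) =====
theorem getFullString_spec : Claim_equal_getFullString := by
  intro list _
  unfold Spec_getFullString getFullString getFullString_alt
  rw [← String.toList_inj]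
  simp only [PySem.List.foldl_append_if, PySem.List.foldl_append_eq_flatMap, List.nil_append]
  rw [pv_fold_outer, pv_foldl_strapp]
  simp only [List.map_flatMap, List.map_map]
  rw [pv_flatten_flatMap]
  have hmk : (String.ofList ([] ++ list.flatMap fun s => pvTot 0 s.toList)).toList
      = list.flatMap fun s => pvTot 0 s.toList := by simp
  rw [hmk, show ("" : String).toList = [] from by decide, List.nil_append]
  congr 1
  funext s
  simpa [Function.comp_def] using pv_string_contrib s
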